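-- pv_equiv track=rewrite | github.com/gaby96/RAG-Implementation | rag-implementation/app/document_extraction/pdf_bookmark_extractor.py | _map_index_to_linebreak_text
-- ===== SOURCE A (Python) =====
-- def _map_index_to_linebreak_text(space_joined_text: str, linebreak_text: str, space_idx: int) -> int:
--     # Very close to your C# logic: match non-whitespace count
--     if space_idx <= 0:
--         return 0
--     if not space_joined_text or not linebreak_text:
--         return space_idx
--
--     non_ws = 0
--     for i in range(min(space_idx, len(space_joined_text))):
--         if not space_joined_text[i].isspace():
--             non_ws += 1
--
--     target = non_ws
--     current = 0
--     for i, ch in enumerate(linebreak_text):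
--         if not ch.isspace():
--             current += 1
--         if current >= target:
--             return i + 1
--
--     return len(linebreak_text)
-- ===== SOURCE B (Python) =====
-- def _map_index_to_linebreak_text(space_joined_text: str, linebreak_text: str, space_idx: int) -> int:
--     if space_idx <= 0:
--         return 0
--     if not space_joined_text or not linebreak_text:
--         return space_idx
--     k = min(space_idx, len(space_joined_text))
--     target = k - sum(c.isspace() for c in space_joined_text[:k])
--     # prefix sums of non-whitespace counts over linebreak_text
--     counts = []
--     total = 0
--     for c in linebreak_text:
--         if not c.isspace():
--             total += 1
--         counts.append(total)
--     # binary search (bisect_left) for the first position whose count reaches target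
--     lo, hi = 0, len(counts)
--     while lo < hi:
--         mid = (lo + hi) // 2
--         if counts[mid] < target:
--             lo = mid + 1
--         else:
--             hi = mid
--     return lo + 1 if lo < len(counts) else len(linebreak_text)
-- ===== Notes on version B (the rewrite author's own statement) =====
-- stated objective: alternative
-- what changed: Replaces A's linear early-return scan of linebreak_text with a prefix-sum array of non-whitespace counts plus a bisect_left-style binary search over it, and computes the target by subtracting the whitespace count of the prefix from its length.
import Mathlib
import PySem

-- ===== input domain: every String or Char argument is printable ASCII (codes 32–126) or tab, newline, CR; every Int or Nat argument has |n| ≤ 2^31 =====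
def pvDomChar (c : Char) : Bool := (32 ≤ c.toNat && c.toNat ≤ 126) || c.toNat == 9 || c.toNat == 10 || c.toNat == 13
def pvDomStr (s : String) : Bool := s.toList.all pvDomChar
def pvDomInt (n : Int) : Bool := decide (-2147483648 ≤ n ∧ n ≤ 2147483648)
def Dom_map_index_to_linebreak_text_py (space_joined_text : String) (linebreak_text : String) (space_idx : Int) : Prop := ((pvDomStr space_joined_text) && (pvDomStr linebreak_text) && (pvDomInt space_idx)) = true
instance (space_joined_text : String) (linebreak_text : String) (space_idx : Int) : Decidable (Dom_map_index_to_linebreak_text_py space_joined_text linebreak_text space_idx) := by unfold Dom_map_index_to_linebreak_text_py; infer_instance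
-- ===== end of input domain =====

-- B replaces A's linear early-return scan of linebreak_text by a prefix-sum array of
-- non-whitespace counts addressed by a bisect_left-style binary search (objective: alternative).

-- ===== PORT A =====

-- A's second loop: 'for i, ch in enumerate(linebreak_text): …' with early return (none = fell through)
def pvAscan (target : Int) : List (Int × Char) → Int → Option Int
  | [], _ => none
  | (i, ch) :: rest, current =>
      let current' := if PySem.Chars.isspace ch then current else current + 1
      if target ≤ current' then some (i + 1) else pvAscan target rest current'

def map_index_to_linebreak_text_py (space_joined_text : String) (linebreak_text : String) (space_idx : Int) : Int :=
  if space_idx ≤ 0 then 0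
  else if space_joined_text.toList = [] ∨ linebreak_text.toList = [] then space_idx
  else
    let sj := space_joined_text.toList
    let lb := linebreak_text.toList
    -- for i in range(min(space_idx, len(space_joined_text))): if not s[i].isspace(): non_ws += 1
    let non_ws : Int := (PySem.List.pyRange 0 (min space_idx (sj.length : Int)) 1).foldl
        (fun acc i => if PySem.Chars.isspace (PySem.List.pyGetD sj i ' ') then acc else acc + 1) 0
    let target := non_ws
    match pvAscan target (PySem.List.enumerate lb 0) 0 with
    | some r => r
    | none => (lb.length : Int)

-- ===== PORT B =====

-- B's prefix-sum loop: 'total += (not c.isspace()); counts.append(total)'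
def pvCounts : List Char → Int → List Int
  | [], _ => []
  | c :: cs, total =>
      let total' := if PySem.Chars.isspace c then total else total + 1
      total' :: pvCounts cs total'

-- B's hand-written bisect_left: 'while lo < hi: mid = (lo+hi)//2; …'
-- (structural recursion on a fuel counter ≥ hi - lo, only to make the same loop total)
def pvBsearchFuel (counts : List Int) (t : Int) : Nat → Nat → Nat → Nat
  | 0, lo, _ => lo
  | n + 1, lo, hi =>
    if lo < hi then
      if counts.getD ((lo + hi) / 2) 0 < t then pvBsearchFuel counts t n ((lo + hi) / 2 + 1) hi
      else pvBsearchFuel counts t n lo ((lo + hi) / 2)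
    else lo

def pvBsearch (counts : List Int) (t : Int) (lo hi : Nat) : Nat :=
  pvBsearchFuel counts t (hi - lo) lo hi

def map_index_to_linebreak_text_py_alt (space_joined_text : String) (linebreak_text : String) (space_idx : Int) : Int :=
  if space_idx ≤ 0 then 0
  else if space_joined_text.toList = [] ∨ linebreak_text.toList = [] then space_idx
  else
    let sj := space_joined_text.toList
    let lb := linebreak_text.toList
    let k := min space_idx (sj.length : Int)
    -- target = k - sum(c.isspace() for c in space_joined_text[:k])
    let target : Int := k - ((PySem.List.slice sj none (some k)).filter
        (fun c => PySem.Chars.isspace c)).length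
    let counts := pvCounts lb 0
    let lo := pvBsearch counts target 0 counts.length
    if lo < counts.length then (lo : Int) + 1 else (lb.length : Int)

-- ===== PRECONDITION & SPEC =====
def Spec_map_index_to_linebreak_text_py (space_joined_text : String) (linebreak_text : String) (space_idx : Int) (out : Int) : Prop := out = map_index_to_linebreak_text_py_alt space_joined_text linebreak_text space_idx
instance (space_joined_text : String) (linebreak_text : String) (space_idx : Int) (out : Int) : Decidable (Spec_map_index_to_linebreak_text_py space_joined_text linebreak_text space_idx out) := by unfold Spec_map_index_to_linebreak_text_py; infer_instance

-- ===== CLAIM (what is proved, stated in full; the proofs are below) =====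
def Claim_equal_map_index_to_linebreak_text_py : Prop := ∀ (space_joined_text : String) (linebreak_text : String) (space_idx : Int), Dom_map_index_to_linebreak_text_py space_joined_text linebreak_text space_idx → Spec_map_index_to_linebreak_text_py space_joined_text linebreak_text space_idx (map_index_to_linebreak_text_py space_joined_text linebreak_text space_idx)

-- ===== LEMMAS AND PROOFS =====

theorem pvCounts_length (cs : List Char) : ∀ (cur : Int), (pvCounts cs cur).length = cs.length := by
  induction cs with
  | nil => intro cur; rfl
  | cons c cs ih => intro cur; simp [pvCounts, ih]

theorem pvCounts_mem_ge (cs : List Char) : ∀ (cur : Int) (x : Int), x ∈ pvCounts cs cur → cur ≤ x := by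
  induction cs with
  | nil => intro cur x hx; simp [pvCounts] at hx
  | cons c cs ih =>
    intro cur x hx
    simp only [pvCounts, List.mem_cons] at hx
    by_cases h : PySem.Chars.isspace c = true <;> simp only [h] at hx <;>
      rcases hx with rfl | hx
    · exact le_refl _
    · simpa using ih cur x (by simpa [h] using hx)
    · omega
    · have := ih (cur + 1) x (by simpa [h] using hx); omega

theorem pvCounts_pairwise (cs : List Char) : ∀ (cur : Int), List.Pairwise (· ≤ ·) (pvCounts cs cur) := by
  induction cs with
  | nil => intro cur; simp [pvCounts]
  | cons c cs ih =>
    intro cur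
    simp only [pvCounts, List.pairwise_cons]
    exact ⟨fun x hx => pvCounts_mem_ge cs _ x hx, ih _⟩

-- A's scan returns the first index whose running count reaches target, phrased via findIdx on B's prefix sums
theorem pvAscan_findIdx (t : Int) (cs : List Char) : ∀ (i cur : Int),
    pvAscan t (PySem.List.enumerate cs i) cur =
      (if (pvCounts cs cur).findIdx (fun x => decide (t ≤ x)) < cs.length
       then some (i + ((pvCounts cs cur).findIdx (fun x => decide (t ≤ x)) : Int) + 1)
       else none) := by
  induction cs with
  | nil => intro i cur; simp [PySem.List.enumerate_nil, pvAscan, pvCounts]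
  | cons c cs ih =>
    intro i cur
    rw [PySem.List.enumerate_cons]
    simp only [pvAscan, pvCounts, List.findIdx_cons, List.length_cons]
    set tot := if PySem.Chars.isspace c = true then cur else cur + 1 with htot
    by_cases ht : t ≤ tot
    · simp [ht]
    · simp only [ht, decide_false, if_false, cond_false]
      rw [ih (i + 1) tot]
      by_cases hlt : (pvCounts cs tot).findIdx (fun x => decide (t ≤ x)) < cs.length
      · rw [if_pos hlt, if_pos (by omega)]
        congr 1
        push_cast
        ring
      · rw [if_neg hlt, if_neg (by omega)]

-- the hand-written bisect_left equals findIdx of 'count ≥ target' on the monotone prefix sums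
theorem pvBsearch_eq (counts : List Int) (t : Int)
    (hmono : List.Pairwise (· ≤ ·) counts) :
    ∀ (n lo hi : Nat), hi - lo ≤ n → lo ≤ hi → hi ≤ counts.length →
    (∀ i, i < lo → ∀ (h : i < counts.length), counts[i] < t) →
    (∀ i, hi ≤ i → ∀ (h : i < counts.length), t ≤ counts[i]) →
    pvBsearchFuel counts t n lo hi = counts.findIdx (fun x => decide (t ≤ x)) := by
  have hm := List.pairwise_iff_getElem.mp hmono
  intro n
  induction n with
  | zero =>
    intro lo hi hn hlohi hhile hlow hhigh
    have heq : lo = hi := by omega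
    subst heq
    show lo = _
    by_cases hlt : lo < counts.length
    · refine ((List.findIdx_eq hlt).mpr
        ⟨by simpa using hhigh lo (le_refl _) hlt, fun j hj => by
          simpa using (hlow j hj (Nat.lt_trans hj hlt)).not_ge⟩).symm
    · have hlen : lo = counts.length := by omega
      rw [hlen]
      refine (List.findIdx_eq_length.mpr fun x hx => ?_).symm
      obtain ⟨i, hi, rfl⟩ := List.mem_iff_getElem.mp hx
      simpa using (hlow i (by omega) hi).not_ge
  | succ n ih =>
    intro lo hi hn hlohi hhile hlow hhigh
    rw [pvBsearchFuel]
    by_cases h : lo < hi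
    · rw [if_pos h]
      have hmidlo : lo ≤ (lo + hi) / 2 := by omega
      have hmidhi : (lo + hi) / 2 < hi := by omega
      have hmidlen : (lo + hi) / 2 < counts.length := by omega
      rw [List.getD_eq_getElem counts 0 hmidlen]
      by_cases hc : counts[(lo + hi) / 2] < t
      · rw [if_pos hc]
        refine ih ((lo + hi) / 2 + 1) hi (by omega) (by omega) hhile ?_ hhigh
        intro i hi' h'
        rcases Nat.lt_or_ge i ((lo + hi) / 2) with hlt | hge
        · calc counts[i] ≤ counts[(lo + hi) / 2] := hm i _ h' hmidlen hlt
            _ < t := hc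
        · have : i = (lo + hi) / 2 := by omega
          subst this; exact hc
      · rw [if_neg hc]
        refine ih lo ((lo + hi) / 2) (by omega) (by omega) (by omega) hlow ?_
        intro i hi' h'
        rcases Nat.lt_or_ge ((lo + hi) / 2) i with hlt | hge
        · calc t ≤ counts[(lo + hi) / 2] := by omega
            _ ≤ counts[i] := hm _ i hmidlen h' hlt
        · have : i = (lo + hi) / 2 := by omega
          subst this; omega
    · rw [if_neg h]
      have heq : lo = hi := by omega
      subst heq
      by_cases hlt : lo < counts.length
      · refine ((List.findIdx_eq hlt).mpr
          ⟨by simpa using hhigh lo (le_refl _) hlt, fun j hj => by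
            simpa using (hlow j hj (Nat.lt_trans hj hlt)).not_ge⟩).symm
      · have hlen : lo = counts.length := by omega
        rw [hlen]
        refine (List.findIdx_eq_length.mpr fun x hx => ?_).symm
        obtain ⟨i, hi, rfl⟩ := List.mem_iff_getElem.mp hx
        simpa using (hlow i (by omega) hi).not_ge

-- A's index loop counts exactly the non-whitespace characters of the prefix (Int accumulator)
theorem pvCount_fold (l : List Char) (n : Nat) : ∀ (acc : Int), n ≤ l.length →
    (PySem.List.pyRange 0 (n : Int) 1).foldl
      (fun acc i => if PySem.Chars.isspace (PySem.List.pyGetD l i ' ') then acc else acc + 1) acc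
      = acc + ((l.take n).filter (fun c => !PySem.Chars.isspace c)).length := by
  induction n with
  | zero => intro acc _; simp [PySem.List.pyRange_one_eq_nil]
  | succ n ih =>
    intro acc hn
    have hcast : ((n + 1 : Nat) : Int) = (n : Int) + 1 := by push_cast; ring
    rw [hcast, PySem.List.pyRange_one_succ_right (by positivity), List.foldl_append,
      ih acc (by omega)]
    have hlt : n < l.length := by omega
    have hget : PySem.List.pyGetD l (n : Int) ' ' = l[n] := by
      rw [PySem.List.pyGetD_eq_getElem l ' ' (by positivity) (by exact_mod_cast hlt)]
      simp
    rw [List.take_succ]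
    simp only [List.foldl_cons, List.foldl_nil, hget, List.getElem?_eq_getElem hlt,
      Option.toList_some, List.filter_append, List.length_append, List.filter_cons]
    by_cases h : PySem.Chars.isspace l[n] = true <;> simp [h] <;> push_cast <;> ring

theorem map_index_to_linebreak_text_py_eq_alt (space_joined_text : String)
    (linebreak_text : String) (space_idx : Int) :
    map_index_to_linebreak_text_py space_joined_text linebreak_text space_idx
      = map_index_to_linebreak_text_py_alt space_joined_text linebreak_text space_idx := by
  unfold map_index_to_linebreak_text_py map_index_to_linebreak_text_py_alt
  by_cases h0 : space_idx ≤ 0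
  · rw [if_pos h0, if_pos h0]
  · rw [if_neg h0, if_neg h0]
    by_cases hemp : space_joined_text.toList = [] ∨ linebreak_text.toList = []
    · rw [if_pos hemp, if_pos hemp]
    · rw [if_neg hemp, if_neg hemp]
      push_neg at hemp
      obtain ⟨hsj, hlb⟩ := hemp
      dsimp only
      set sj := space_joined_text.toList
      set lb := linebreak_text.toList
      have hb : (0 : Int) ≤ min space_idx (sj.length : Int) := by
        simp only [le_min_iff]
        exact ⟨by omega, by positivity⟩
      set m : Nat := (min space_idx (sj.length : Int)).toNat with hmdef
      have hmin : min space_idx (sj.length : Int) = (m : Int) := by omega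
      have hmle : m ≤ sj.length := by omega
      -- the two targets are the same integer
      have htake : (sj.take m).length = m := by simpa using hmle
      have hsplit : ((sj.take m).filter (fun c => PySem.Chars.isspace c)).length
          + ((sj.take m).filter (fun c => !PySem.Chars.isspace c)).length = m := by
        have h2 := List.length_eq_length_filter_add
          (l := sj.take m) (fun c => PySem.Chars.isspace c)
        simp only [htake] at h2
        simpa using h2.symm
      rw [PySem.List.slice_to _ hb, hmin, pvCount_fold _ m 0 hmle]
      simp only [Int.toNat_natCast, Int.zero_add]
      have htgt : ((m : Int)) - (((sj.take m).filter (fun c => PySem.Chars.isspace c)).length : Int)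
          = (((sj.take m).filter (fun c => !PySem.Chars.isspace c)).length : Int) := by omega
      rw [htgt]
      set t : Int := (((sj.take m).filter (fun c => !PySem.Chars.isspace c)).length : Int)
      -- both sides are findIdx on the prefix sums
      rw [pvAscan_findIdx t lb 0 0,
        show pvBsearch (pvCounts lb 0) t 0 (pvCounts lb 0).length
            = (pvCounts lb 0).findIdx (fun x => decide (t ≤ x)) from
          pvBsearch_eq (pvCounts lb 0) t (pvCounts_pairwise lb 0) ((pvCounts lb 0).length - 0) 0
          (pvCounts lb 0).length (by omega) (by omega) (le_refl _)
          (by intro i hi _; omega) (by intro i hi h; omega)]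
      rw [pvCounts_length lb 0]
      by_cases hr : (pvCounts lb 0).findIdx (fun x => decide (t ≤ x)) < lb.length
      · rw [if_pos hr, if_pos hr]
        push_cast
        ring
      · rw [if_neg hr, if_neg hr]

-- ===== VERDICT (by name: the statement is the Claim_ definition above) =====
theorem map_index_to_linebreak_text_py_spec : Claim_equal_map_index_to_linebreak_text_py := by
  intro s l k _
  unfold Spec_map_index_to_linebreak_text_py
  exact map_index_to_linebreak_text_py_eq_alt s l k
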